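-- pv_equiv track=rewrite | github.com/JY-Mar/clash-yaml-merger | utils/object_utils.py | pick_properties
-- ===== SOURCE A (Python) =====
-- from typing import Any, Dict, List
--
-- def pick_properties(
--     d: Dict[str, Any] | None, keys: List[str] | None = None
-- ) -> Dict[str, Any]:
--     """
--     获取字典中指定的属性，合成并返回新的字典
--
--     Args:
--         d: 原始字典
--         keys: 需要提取的属性
--
--     Returns:
--         新的字典
--     """
--
--     if not isinstance(d, dict) or (isinstance(d, dict) and len(d) == 0):
--       return {}
--
--     if not isinstance(keys, list) or (isinstance(keys, list) and len(keys) == 0):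
--       return d if isinstance(d, dict) else {}
--
--     return {k: d[k] for k in keys if k in d} if isinstance(d, dict) else {}
-- ===== SOURCE B (Python) =====
-- def pick_properties(d, keys=None):
--     if not isinstance(d, dict) or len(d) == 0:
--         return {}
--     if not isinstance(keys, list) or len(keys) == 0:
--         return d
--     # first-occurrence index of each requested key
--     pos = {}
--     for i, k in enumerate(keys):
--         if k not in pos:
--             pos[k] = i
--     # scan d once, keep requested entries, restore the keys-list order
--     items = [(k, v) for k, v in d.items() if k in pos]
--     items.sort(key=lambda kv: pos[kv[0]])
--     return dict(items)
-- ===== Notes on version B (the rewrite author's own statement) =====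
-- stated objective: alternative
-- what changed: B flips the driving loop: instead of A's dict comprehension over `keys` indexing d, B builds a first-occurrence index of the requested keys, makes one filtering pass over d's items, and stable-sorts the kept entries by that index to restore A's key order.
import Mathlib
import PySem

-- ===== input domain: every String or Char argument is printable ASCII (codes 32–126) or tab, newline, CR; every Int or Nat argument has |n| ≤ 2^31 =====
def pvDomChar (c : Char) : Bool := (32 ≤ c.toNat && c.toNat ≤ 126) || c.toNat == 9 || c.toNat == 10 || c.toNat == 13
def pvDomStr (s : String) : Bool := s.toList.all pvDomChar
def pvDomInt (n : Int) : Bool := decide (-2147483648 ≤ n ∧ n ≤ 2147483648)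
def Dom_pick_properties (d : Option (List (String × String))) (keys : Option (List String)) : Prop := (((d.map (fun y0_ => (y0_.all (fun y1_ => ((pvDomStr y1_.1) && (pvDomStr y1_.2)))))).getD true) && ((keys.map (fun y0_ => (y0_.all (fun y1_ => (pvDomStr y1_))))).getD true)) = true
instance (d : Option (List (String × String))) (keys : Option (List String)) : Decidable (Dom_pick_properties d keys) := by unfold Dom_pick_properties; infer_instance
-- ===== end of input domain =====

-- B iterates over the dict's items with a first-occurrence index of the requested keys and re-sorts,
-- instead of A's comprehension over `keys` indexing into the dict (objective: alternative, same cost class).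

-- ===== PORT A =====
-- literal port of A: guards, then the dict comprehension {k: d[k] for k in keys if k in d}
-- (d[k] is guarded by `k in d`, so getD with a dummy default is exact here)
def pick_properties (d : Option (List (String × String))) (keys : Option (List String)) : List (String × String) :=
  match d with
  | none => []
  | some l =>
    if l.length = 0 then []
    else
      match keys with
      | none => l
      | some ks =>
        if ks.length = 0 then l
        else
          (ks.foldl (fun acc k =>
              if (PySem.Dict.mk l).contains k then
                acc.insert k ((PySem.Dict.mk l).getD k "")
              else acc) PySem.Dict.empty).items

-- ===== PORT B =====
-- literal port of Source B: same guards; first-occurrence index `pos`, one filter pass over d's items,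
-- stable sort by pos, then dict(items)
def pick_properties_alt (d : Option (List (String × String))) (keys : Option (List String)) : List (String × String) :=
  match d with
  | none => []
  | some l =>
    if l.length = 0 then []
    else
      match keys with
      | none => l
      | some ks =>
        if ks.length = 0 then l
        else
          let pos := (PySem.List.enumerate ks 0).foldl
              (fun p ik => if p.contains ik.2 then p else p.insert ik.2 ik.1)
              (PySem.Dict.empty : PySem.Dict String Int)
          let items := l.filter (fun kv => pos.contains kv.1)
          let sortedItems := PySem.List.sorted items (fun kv => pos.getD kv.1 0) false
          (sortedItems.foldl (fun dd kv => dd.insert kv.1 kv.2)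
              (PySem.Dict.empty : PySem.Dict String String)).items

-- ===== PRECONDITION & SPEC =====
-- Pre_ only states the representation invariant of a Python dict value: the association list
-- standing for `d` has pairwise-distinct keys. It excludes no input the Python A can receive.
def Pre_pick_properties (d : Option (List (String × String))) (keys : Option (List String)) : Prop :=
  ((d.getD []).map Prod.fst).Nodup

instance (d : Option (List (String × String))) (keys : Option (List String)) : Decidable (Pre_pick_properties d keys) := by unfold Pre_pick_properties; infer_instance

def pvWitness_pick_properties : (Option (List (String × String))) × Option (List String) :=
  (some [("a", "1"), ("b", "2"), ("c", "3")], some ["c", "a", "c", "z"])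

def Spec_pick_properties (d : Option (List (String × String))) (keys : Option (List String)) (out : List (String × String)) : Prop := out = pick_properties_alt d keys
instance (d : Option (List (String × String))) (keys : Option (List String)) (out : List (String × String)) : Decidable (Spec_pick_properties d keys out) := by unfold Spec_pick_properties; infer_instance

-- ===== CLAIM (what is proved, stated in full; the proofs are below) =====
def Claim_equal_pick_properties : Prop := ∀ (d : Option (List (String × String))) (keys : Option (List String)), Dom_pick_properties d keys → Pre_pick_properties d keys → Spec_pick_properties d keys (pick_properties d keys)

-- ===== LEMMAS AND PROOFS =====

-- A-side loop: value of the insert-only fold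
lemma pv_getD_foldl (v : String → String) :
    ∀ (m : List String) (d : PySem.Dict String String) (k : String),
    (m.foldl (fun a x => a.insert x (v x)) d).getD k "" = if k ∈ m then v k else d.getD k "" := by
  intro m
  induction m with
  | nil => intro d k; simp
  | cons x t ih =>
    intro d k
    rw [List.foldl_cons, ih]
    by_cases hm : k ∈ t
    · simp [hm]
    · by_cases hx : k = x
      · subst hx; simp [hm, PySem.Dict.getD_insert_self]
      · simp [hm, hx, PySem.Dict.getD_insert_of_ne (hne := hx)]

lemma pv_A_items (l : List (String × String)) (ks : List String) :
    (ks.foldl (fun acc k => if (PySem.Dict.mk l).contains k then acc.insert k ((PySem.Dict.mk l).getD k "") else acc) PySem.Dict.empty).items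
    = (PySem.Set.ofList (ks.filter (fun k => (PySem.Dict.mk l).contains k))).map
        (fun k => (k, (PySem.Dict.mk l).getD k "")) := by
  rw [← List.foldl_filter]
  set m := ks.filter (fun k => (PySem.Dict.mk l).contains k) with hm
  have hkeys : ((m.foldl (fun (a : PySem.Dict String String) x => a.insert x ((PySem.Dict.mk l).getD x "")) PySem.Dict.empty)).keys
      = PySem.Set.ofList m := by
    rw [PySem.Dict.keys_foldl_insert]
    simp [PySem.Set.update_nil_left]
  have hnd : ((m.foldl (fun (a : PySem.Dict String String) x => a.insert x ((PySem.Dict.mk l).getD x "")) PySem.Dict.empty)).keys.Nodup := by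
    rw [hkeys]; exact PySem.Set.nodup_ofList m
  rw [PySem.Dict.items_eq_map_keys _ hnd "", hkeys]
  apply List.map_congr_left
  intro k hk
  have hkm : k ∈ m := (PySem.Set.mem_ofList m k).1 hk
  rw [pv_getD_foldl]
  simp [hkm]

-- B-side `pos` loop
lemma pv_pos_contains :
    ∀ (ks : List String) (s : Int) (p : PySem.Dict String Int) (k : String),
    ((PySem.List.enumerate ks s).foldl
        (fun p ik => if p.contains ik.2 then p else p.insert ik.2 ik.1) p).contains k
      = (p.contains k || decide (k ∈ ks)) := by
  intro ks
  induction ks with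
  | nil => intro s p k; simp [PySem.List.enumerate_nil]
  | cons x t ih =>
    intro s p k
    rw [PySem.List.enumerate_cons, List.foldl_cons]
    by_cases hx : p.contains x
    · simp only [hx, if_true, ih]
      by_cases hk : k = x
      · subst hk; simp [hx]
      · simp [hk]
    · rw [if_neg (by simp [hx])]
      rw [ih, PySem.Dict.contains_insert]
      by_cases hk : k = x
      · subst hk; simp
      · rw [show (k == x) = false from by simp [hk]]
        simp [hk]

lemma pv_pos_getD_frozen :
    ∀ (ks : List String) (s : Int) (p : PySem.Dict String Int) (k : String),
    p.contains k = true →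
    ((PySem.List.enumerate ks s).foldl
        (fun p ik => if p.contains ik.2 then p else p.insert ik.2 ik.1) p).getD k 0
      = p.getD k 0 := by
  intro ks
  induction ks with
  | nil => intro s p k _; simp [PySem.List.enumerate_nil]
  | cons x t ih =>
    intro s p k hk
    rw [PySem.List.enumerate_cons, List.foldl_cons]
    by_cases hx : p.contains x
    · simp only [hx, if_true]; exact ih _ _ _ hk
    · rw [if_neg (by simp [hx])]
      have hne : k ≠ x := by rintro rfl; rw [hk] at hx; exact hx rfl
      rw [ih _ _ _ (by rw [PySem.Dict.contains_insert, hk]; simp)]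
      exact PySem.Dict.getD_insert_of_ne _ _ _ hne

lemma pv_pos_getD :
    ∀ (ks : List String) (s : Int) (p : PySem.Dict String Int) (k : String),
    p.contains k = false → k ∈ ks →
    ((PySem.List.enumerate ks s).foldl
        (fun p ik => if p.contains ik.2 then p else p.insert ik.2 ik.1) p).getD k 0
      = s + (ks.idxOf k : Int) := by
  intro ks
  induction ks with
  | nil => intro s p k _ h; simp at h
  | cons x t ih =>
    intro s p k hk hmem
    rw [PySem.List.enumerate_cons, List.foldl_cons]
    by_cases hkx : k = x
    · subst hkx
      rw [if_neg (by simp [hk])]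
      rw [pv_pos_getD_frozen _ _ _ _ (by rw [PySem.Dict.contains_insert]; simp)]
      rw [PySem.Dict.getD_insert_self]
      simp [List.idxOf_cons_self]
    · have hmt : k ∈ t := by cases hmem with | head => exact absurd rfl hkx | tail _ h => exact h
      have hidx : (x :: t).idxOf k = t.idxOf k + 1 := by
        simp [Ne.symm hkx]
      by_cases hx : p.contains x
      · simp only [hx, if_true]
        rw [ih _ _ _ hk hmt, hidx]; push_cast; ring
      · rw [if_neg (by simp [hx])]
        have hk' : (p.insert x s).contains k = false := by
          rw [PySem.Dict.contains_insert]
          simp [hkx, hk]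
        rw [ih _ _ _ hk' hmt, hidx]; push_cast; ring

-- first-occurrence order: the distinct requested keys, in order, have strictly increasing first indices
lemma pv_pairwise_idxOf (c : String → Bool) :
    ∀ (ks : List String),
    (PySem.Set.ofList (ks.filter c)).Pairwise (fun a b => ks.idxOf a < ks.idxOf b) := by
  intro ks
  induction ks with
  | nil => simp [PySem.Set.ofList_nil]
  | cons x t ih =>
    by_cases hc : c x
    · rw [List.filter_cons_of_pos hc, PySem.Set.ofList_cons]
      constructor
      · intro b hb
        have hb' := (PySem.Set.mem_discard _ _ _).1 hb
        have hbx : b ≠ x := hb'.2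
        rw [List.idxOf_cons_self, List.idxOf_cons_ne t (Ne.symm hbx)]
        omega
      · have hpw : ((PySem.Set.ofList (t.filter c)).discard x).Pairwise
            (fun a b => t.idxOf a < t.idxOf b) :=
          List.Pairwise.sublist List.filter_sublist ih
        refine List.Pairwise.imp_of_mem ?_ hpw
        intro a b ha hb hlt
        have hax : a ≠ x := ((PySem.Set.mem_discard _ _ _).1 ha).2
        have hbx : b ≠ x := ((PySem.Set.mem_discard _ _ _).1 hb).2
        rw [List.idxOf_cons_ne t (Ne.symm hax), List.idxOf_cons_ne t (Ne.symm hbx)]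
        omega
    · rw [List.filter_cons_of_neg (by simp [hc])]
      refine List.Pairwise.imp_of_mem ?_ ih
      intro a b ha hb hlt
      have hat : c a = true := (List.mem_filter.1 ((PySem.Set.mem_ofList _ _).1 ha)).2
      have hbt : c b = true := (List.mem_filter.1 ((PySem.Set.mem_ofList _ _).1 hb)).2
      have hax : a ≠ x := by rintro rfl; rw [hat] at hc; exact hc rfl
      have hbx : b ≠ x := by rintro rfl; rw [hbt] at hc; exact hc rfl
      rw [List.idxOf_cons_ne t (Ne.symm hax), List.idxOf_cons_ne t (Ne.symm hbx)]
      omega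

-- membership bridge: a pair is in l (nodup keys) iff the dict lookup finds it
lemma pv_mem_iff (l : List (String × String)) (hnd : (l.map Prod.fst).Nodup) (p : String × String) :
    p ∈ l ↔ (PySem.Dict.mk l).get? p.1 = some p.2 := by
  constructor
  · intro h
    exact PySem.Dict.get?_of_mem_items (d := PySem.Dict.mk l) (k := p.1) (v := p.2) (by exact h) hnd
  · intro h
    exact PySem.Dict.mem_items_of_get?_eq_some (d := PySem.Dict.mk l) h

-- the core equality on the main branch
lemma pv_core (l : List (String × String)) (ks : List String)
    (hnd : (l.map Prod.fst).Nodup) :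
    (ks.foldl (fun acc k =>
        if (PySem.Dict.mk l).contains k then
          acc.insert k ((PySem.Dict.mk l).getD k "")
        else acc) PySem.Dict.empty).items
    =
    (let pos := (PySem.List.enumerate ks 0).foldl
        (fun p ik => if p.contains ik.2 then p else p.insert ik.2 ik.1)
        (PySem.Dict.empty : PySem.Dict String Int)
     let items := l.filter (fun kv => pos.contains kv.1)
     let sortedItems := PySem.List.sorted items (fun kv => pos.getD kv.1 0) false
     (sortedItems.foldl (fun dd kv => dd.insert kv.1 kv.2)
        (PySem.Dict.empty : PySem.Dict String String)).items) := by
  simp only []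
  set c : String → Bool := fun k => (PySem.Dict.mk l).contains k with hc
  set v : String → String := fun k => (PySem.Dict.mk l).getD k "" with hv
  set pos := (PySem.List.enumerate ks 0).foldl
      (fun p ik => if p.contains ik.2 then p else p.insert ik.2 ik.1)
      (PySem.Dict.empty : PySem.Dict String Int) with hpos
  set ys := (PySem.Set.ofList (ks.filter c)).map (fun k => (k, v k)) with hys
  have hApos : ∀ k, pos.contains k = decide (k ∈ ks) := by
    intro k
    rw [hpos, pv_pos_contains]
    simp
  have hgetD : ∀ k, k ∈ ks → pos.getD k 0 = (ks.idxOf k : Int) := by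
    intro k hk
    rw [hpos, pv_pos_getD _ _ _ _ (by simp) hk]
    ring
  -- A's result
  rw [pv_A_items]
  -- B's filtered items
  have hitems : l.filter (fun kv => pos.contains kv.1) = l.filter (fun kv => decide (kv.1 ∈ ks)) :=
    List.filter_congr (fun kv _ => hApos kv.1)
  -- nodups
  have hlnd : l.Nodup := List.Nodup.of_map Prod.fst hnd
  have hysnd : ys.Nodup := by
    refine List.Nodup.map ?_ (PySem.Set.nodup_ofList _)
    intro a b hab
    exact congrArg Prod.fst hab
  have hindnd : (l.filter (fun kv => pos.contains kv.1)).Nodup := List.Nodup.filter _ hlnd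
  -- ys is a permutation of the filtered items
  have hperm : ys.Perm (l.filter (fun kv => pos.contains kv.1)) := by
    rw [(List.perm_ext_iff_of_nodup hysnd hindnd)]
    intro p
    rw [hitems, List.mem_filter, hys, List.mem_map]
    constructor
    · rintro ⟨k, hk, rfl⟩
      have hk' := (PySem.Set.mem_ofList _ _).1 hk
      have hcc := (List.mem_filter.1 hk')
      refine ⟨?_, by simpa using hcc.1⟩
      rw [pv_mem_iff l hnd]
      have : (PySem.Dict.mk l).contains k = true := hcc.2
      rw [PySem.Dict.contains_eq_isSome_get?] at this
      obtain ⟨w, hw⟩ := Option.isSome_iff_exists.1 this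
      simp only [hw]
      rw [show v k = w from by rw [hv]; exact PySem.Dict.getD_of_get?_eq_some _ _ hw]
    · rintro ⟨hmem, hks⟩
      have hg : (PySem.Dict.mk l).get? p.1 = some p.2 := (pv_mem_iff l hnd p).1 hmem
      refine ⟨p.1, ?_, ?_⟩
      · rw [PySem.Set.mem_ofList, List.mem_filter]
        refine ⟨by simpa using hks, ?_⟩
        show c p.1 = true
        rw [hc]
        simp only []
        rw [PySem.Dict.contains_eq_isSome_get?, hg]
        rfl
      · rw [show v p.1 = p.2 from PySem.Dict.getD_of_get?_eq_some _ _ hg]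
  -- ys is strictly increasing in the sort key
  have hpw : ys.Pairwise (fun a b => pos.getD a.1 0 < pos.getD b.1 0) := by
    rw [hys, List.pairwise_map]
    refine List.Pairwise.imp_of_mem ?_ (pv_pairwise_idxOf c ks)
    intro a b ha hb hlt
    have hak : a ∈ ks := (List.mem_filter.1 ((PySem.Set.mem_ofList _ _).1 ha)).1
    have hbk : b ∈ ks := (List.mem_filter.1 ((PySem.Set.mem_ofList _ _).1 hb)).1
    simp only [hgetD a hak, hgetD b hbk]
    exact_mod_cast hlt
  have hsorted : PySem.List.sorted (l.filter (fun kv => pos.contains kv.1))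
      (fun kv => pos.getD kv.1 0) false = ys :=
    PySem.List.sorted_eq_of_perm_of_pairwise_lt _ _ _ hperm hpw
  rw [hsorted]
  -- rebuilding the dict from ys (distinct fresh keys) appends its pairs in order
  have hfresh : ∀ a ∈ ys, (PySem.Dict.empty : PySem.Dict String String).contains a.1 = false := by
    intro a _; simp
  have hknd : (ys.map (fun a => a.1)).Nodup := by
    rw [hys, List.map_map]
    have hid : ((fun (a : String × String) => a.1) ∘ fun k => (k, v k)) = id := rfl
    rw [hid, List.map_id]
    exact PySem.Set.nodup_ofList _
  have hbuild : (List.foldl (fun dd kv => dd.insert kv.1 kv.2)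
      (PySem.Dict.empty : PySem.Dict String String) ys).items = ys := by
    have h2 := PySem.Dict.items_foldl_insert_fresh (l := ys) (k := fun a => a.1)
      (v := fun a => a.2) (d := PySem.Dict.empty) hfresh hknd
    simpa using h2
  rw [hbuild, hys]


-- ===== VERDICT (by name: the statement is the Claim_ definition above) =====
theorem pick_properties_spec : Claim_equal_pick_properties := by
  intro d keys _ hpre
  unfold Spec_pick_properties pick_properties pick_properties_alt
  cases d with
  | none => rfl
  | some l =>
    by_cases hl : l.length = 0
    · simp [hl]
    · cases keys with
      | none => simp [hl]
      | some ks =>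
        by_cases hks : ks.length = 0
        · simp [hl, hks]
        · simp only [hl, hks, if_false]
          have hnd : (l.map Prod.fst).Nodup := by
            simpa [Pre_pick_properties] using hpre
          exact pv_core l ks hnd
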